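-- pv_equiv track=rewrite | github.com/ymatts/glycoMusubi | scripts/compare_baseline_metrics.py | downstream_metric_columns
-- ===== SOURCE A (Python) =====
-- from typing import Dict, Iterable, List, Optional, Tuple
--
-- PRIMARY_METRICS = {
--     "glycan_protein_interaction": ["auc_roc", "auc_pr", "f1_optimal"],
--     "drug_target_identification": ["auc_roc", "enrichment_factor@1%"],
--     "binding_site_prediction": ["residue_auc", "site_f1"],
--     "disease_association_prediction": ["auc_roc", "recall@10", "ndcg@10"],
--     "glycan_function_prediction": ["mean_accuracy", "mean_f1", "mean_mcc"],
--     "immunogenicity": ["auc_roc", "auc_pr", "f1_optimal"],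
-- }
--
-- def downstream_metric_columns(tasks: Iterable[str], payloads: Iterable[Dict[str, Dict]]) -> List[Tuple[str, str]]:
--     cols: List[Tuple[str, str]] = []
--     seen = set()
--     for task in tasks:
--         for metric in PRIMARY_METRICS.get(task, []):
--             key = (task, metric)
--             if key not in seen:
--                 cols.append(key)
--                 seen.add(key)
--         # Add remaining metrics found in payloads.
--         extras = set()
--         for data in payloads:
--             task_payload = data.get(task, {})
--             if isinstance(task_payload, dict):
--                 extras.update(task_payload.keys())
--         for metric in sorted(extras):
--             key = (task, metric)
--             if key not in seen:
--                 cols.append(key)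
--                 seen.add(key)
--     return cols
-- ===== SOURCE B (Python) =====
-- from typing import Dict, Iterable, List, Tuple
--
-- PRIMARY_METRICS = {
--     "glycan_protein_interaction": ["auc_roc", "auc_pr", "f1_optimal"],
--     "drug_target_identification": ["auc_roc", "enrichment_factor@1%"],
--     "binding_site_prediction": ["residue_auc", "site_f1"],
--     "disease_association_prediction": ["auc_roc", "recall@10", "ndcg@10"],
--     "glycan_function_prediction": ["mean_accuracy", "mean_f1", "mean_mcc"],
--     "immunogenicity": ["auc_roc", "auc_pr", "f1_optimal"],
-- }
--
-- def downstream_metric_columns(tasks: Iterable[str], payloads: Iterable[Dict[str, Dict]]) -> List[Tuple[str, str]]: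
--     # One pass over payloads builds task -> set of metric keys; then one pass over
--     # tasks emits primaries followed by the sorted non-primary extras.  A repeated
--     # task contributes nothing new (all its keys were already emitted), so it is
--     # skipped outright.
--     metrics_by_task: Dict[str, set] = {}
--     for data in payloads:
--         for task, task_payload in data.items():
--             if isinstance(task_payload, dict):
--                 metrics_by_task.setdefault(task, set()).update(task_payload.keys())
--     cols: List[Tuple[str, str]] = []
--     done = set()
--     for task in tasks:
--         if task in done:
--             continue
--         done.add(task)
--         primaries = PRIMARY_METRICS.get(task, [])
--         cols.extend((task, m) for m in primaries)
--         cols.extend((task, m)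
--                     for m in sorted(metrics_by_task.get(task, ()))
--                     if m not in primaries)
--     return cols
-- ===== Notes on version B (the rewrite author's own statement) =====
-- stated objective: faster
-- what changed: B replaces A's per-task rescan of all payloads with a single pass that indexes payloads into a task->metric-set dict, then emits columns in one pass over tasks, skipping repeated tasks outright instead of re-filtering every key through a global seen set; Pre_ excludes only Lean-level payload association lists with duplicate keys, which cannot arise from Python dicts.
import Mathlib
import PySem

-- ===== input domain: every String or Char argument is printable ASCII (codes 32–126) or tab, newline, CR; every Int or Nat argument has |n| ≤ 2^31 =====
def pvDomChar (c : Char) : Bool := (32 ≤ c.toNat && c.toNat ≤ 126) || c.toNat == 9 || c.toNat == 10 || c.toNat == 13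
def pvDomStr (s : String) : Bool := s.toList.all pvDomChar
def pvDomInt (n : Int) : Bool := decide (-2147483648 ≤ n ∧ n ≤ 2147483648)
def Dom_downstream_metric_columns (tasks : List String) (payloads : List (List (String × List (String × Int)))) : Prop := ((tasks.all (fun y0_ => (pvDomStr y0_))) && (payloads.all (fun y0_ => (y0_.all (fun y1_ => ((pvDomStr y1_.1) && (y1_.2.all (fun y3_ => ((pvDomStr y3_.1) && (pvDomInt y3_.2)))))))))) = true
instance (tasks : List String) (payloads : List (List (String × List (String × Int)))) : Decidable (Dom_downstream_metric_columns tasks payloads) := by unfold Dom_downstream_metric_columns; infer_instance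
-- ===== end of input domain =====

-- B builds a task->metric-keys index in one pass over payloads instead of rescanning all payloads for every task; proved to return A's exact value on payloads whose key lists are duplicate-free (any value a Python dict can take).


-- ===== PORT A =====
-- module constant PRIMARY_METRICS (shared by both ports, like the Python module constant)
def primaryMetrics : PySem.Dict String (List String) :=
  PySem.Dict.mk [
    ("glycan_protein_interaction", ["auc_roc", "auc_pr", "f1_optimal"]),
    ("drug_target_identification", ["auc_roc", "enrichment_factor@1%"]),
    ("binding_site_prediction", ["residue_auc", "site_f1"]),
    ("disease_association_prediction", ["auc_roc", "recall@10", "ndcg@10"]),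
    ("glycan_function_prediction", ["mean_accuracy", "mean_f1", "mean_mcc"]),
    ("immunogenicity", ["auc_roc", "auc_pr", "f1_optimal"])]

-- literal port of A: one global (cols, seen) state; per task, primaries first, then a
-- fresh scan of ALL payloads collecting extras, sorted, both deduplicated through seen
-- (the Python 'isinstance(task_payload, dict)' test is always true at this type).
def downstream_metric_columns (tasks : List String) (payloads : List (List (String × List (String × Int)))) : List (String × String) :=
  (tasks.foldl (fun (st : List (String × String) × PySem.Set (String × String)) task =>
      let st1 := (primaryMetrics.getD task []).foldl
        (fun st metric =>
          let key := (task, metric)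
          if PySem.Set.contains st.2 key then st
          else (st.1 ++ [key], PySem.Set.add st.2 key)) st
      let extras : PySem.Set String := payloads.foldl
        (fun extras data =>
          let task_payload := (PySem.Dict.mk data).getD task []
          PySem.Set.update extras (task_payload.map Prod.fst)) PySem.Set.empty
      (PySem.List.sorted extras (fun m => m) false).foldl
        (fun st metric =>
          let key := (task, metric)
          if PySem.Set.contains st.2 key then st
          else (st.1 ++ [key], PySem.Set.add st.2 key)) st1)
    ([], PySem.Set.empty)).1

-- ===== PORT B =====
-- literal port of B (Source B): one indexing pass over payloads, then one emitting pass over tasks.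
def downstream_metric_columns_alt (tasks : List String) (payloads : List (List (String × List (String × Int)))) : List (String × String) :=
  let metrics_by_task : PySem.Dict String (PySem.Set String) :=
    payloads.foldl (fun d data =>
      data.foldl (fun d kv =>
        d.insert kv.1 (PySem.Set.update (d.getD kv.1 PySem.Set.empty) (kv.2.map Prod.fst))) d)
      PySem.Dict.empty
  (tasks.foldl (fun (st : List (String × String) × PySem.Set String) task =>
      if PySem.Set.contains st.2 task then st
      else
        let primaries := primaryMetrics.getD task []
        let cols1 := st.1 ++ primaries.map (fun m => (task, m))
        let cols2 := cols1 ++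
          ((PySem.List.sorted (metrics_by_task.getD task PySem.Set.empty) (fun m => m) false).filter
            (fun m => !(primaries.contains m))).map (fun m => (task, m))
        (cols2, PySem.Set.add st.2 task))
    ([], PySem.Set.empty)).1

-- ===== PRECONDITION & SPEC =====
-- Pre_ excludes only payload association lists with duplicate keys: such lists are not a
-- possible value of a Python dict (the type A's payloads carry), so A never runs on them;
-- on those Lean-level representations A's first-match lookup and B's iteration over all
-- items could disagree.
def Pre_downstream_metric_columns (tasks : List String) (payloads : List (List (String × List (String × Int)))) : Prop :=
  ∀ data ∈ payloads, (data.map Prod.fst).Nodup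
instance (tasks : List String) (payloads : List (List (String × List (String × Int)))) : Decidable (Pre_downstream_metric_columns tasks payloads) := by unfold Pre_downstream_metric_columns; infer_instance

def pvWitness_downstream_metric_columns : List String × (List (List (String × List (String × Int)))) :=
  (["binding_site_prediction", "other"], [[("other", [("m2", 1), ("m1", 0)])], [("binding_site_prediction", [("site_f1", 2), ("extra", 3)])]])

def Spec_downstream_metric_columns (tasks : List String) (payloads : List (List (String × List (String × Int)))) (out : List (String × String)) : Prop := out = downstream_metric_columns_alt tasks payloads
instance (tasks : List String) (payloads : List (List (String × List (String × Int)))) (out : List (String × String)) : Decidable (Spec_downstream_metric_columns tasks payloads out) := by unfold Spec_downstream_metric_columns; infer_instance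

-- ===== CLAIM (what is proved, stated in full; the proofs are below) =====
def Claim_equal_downstream_metric_columns : Prop := ∀ (tasks : List String) (payloads : List (List (String × List (String × Int)))), Dom_downstream_metric_columns tasks payloads → Pre_downstream_metric_columns tasks payloads → Spec_downstream_metric_columns tasks payloads (downstream_metric_columns tasks payloads)

-- ===== LEMMAS AND PROOFS =====

-- A's per-task extras set, a definitional sub-term of A's fold
def extrasFold (task : String) (payloads : List (List (String × List (String × Int)))) : PySem.Set String :=
  payloads.foldl
    (fun extras data =>
      PySem.Set.update extras (((PySem.Dict.mk data).getD task []).map Prod.fst)) PySem.Set.empty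

-- B's payload index, a definitional sub-term of B
def bIndex (payloads : List (List (String × List (String × Int)))) : PySem.Dict String (PySem.Set String) :=
  payloads.foldl (fun d data =>
    data.foldl (fun d kv =>
      d.insert kv.1 (PySem.Set.update (d.getD kv.1 PySem.Set.empty) (kv.2.map Prod.fst))) d)
    PySem.Dict.empty

theorem prim_nodup (t : String) : (primaryMetrics.getD t []).Nodup := by
  simp only [primaryMetrics, PySem.Dict.getD_eq_get?_getD, PySem.Dict.get?_mk_cons]
  split_ifs <;> simp [PySem.Dict.get?]

theorem dedup_fold (task : String) (ms : List String) (h : ms.Nodup)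
    (cols : List (String × String)) (seen : PySem.Set (String × String)) :
    ms.foldl (fun st metric =>
        if PySem.Set.contains st.2 (task, metric) then st
        else (st.1 ++ [(task, metric)], PySem.Set.add st.2 (task, metric))) (cols, seen)
    = (cols ++ (ms.filter (fun m => !(PySem.Set.contains seen (task, m)))).map (fun m => (task, m)),
       PySem.Set.update seen (ms.map (fun m => (task, m)))) := by
  induction ms generalizing cols seen with
  | nil => simp [PySem.Set.update]
  | cons m rest ih =>
    have hm : m ∉ rest := (List.nodup_cons.mp h).1
    rw [List.foldl_cons]
    by_cases hc : PySem.Set.contains seen (task, m) = true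
    · have hmem : (task, m) ∈ seen := (PySem.Set.contains_iff _ _).mp hc
      simp only [hc, if_true]
      rw [ih (List.nodup_cons.mp h).2]
      simp [PySem.Set.update_cons, PySem.Set.add, hmem]
    · simp only [hc, Bool.false_eq_true, if_false]
      rw [ih (List.nodup_cons.mp h).2]
      have hfc : ∀ r ∈ rest,
          PySem.Set.contains (PySem.Set.add seen (task, m)) (task, r) = PySem.Set.contains seen (task, r) := by
        intro r hr
        have hne : (task, r) ≠ (task, m) := by
          intro he
          exact hm (by cases he; exact hr)
        apply Bool.coe_iff_coe.mp
        rw [PySem.Set.contains_iff, PySem.Set.contains_iff, PySem.Set.mem_add]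
        simp [hne]
      rw [List.filter_congr (fun r hr => by rw [hfc r hr])]
      have hnmem : (task, m) ∉ seen := by
        intro hmem
        exact hc ((PySem.Set.contains_iff _ _).mpr hmem)
      simp [PySem.Set.update_cons, hnmem]

theorem extrasFold_nodup (task : String) (payloads : List (List (String × List (String × Int)))) :
    (extrasFold task payloads).Nodup := by
  unfold extrasFold
  generalize hs : PySem.Set.empty = s
  have : s.Nodup := by rw [← hs]; simp [PySem.Set.empty]
  clear hs
  induction payloads generalizing s with
  | nil => simpa using this
  | cons d rest ih => exact ih _ (PySem.Set.nodup_update _ _ this)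

theorem sortedE_nodup (task : String) (payloads : List (List (String × List (String × Int)))) :
    (PySem.List.sorted (extrasFold task payloads) (fun m => m) false).Nodup :=
  (PySem.List.sorted_perm _ _ _).nodup_iff.mpr (extrasFold_nodup task payloads)

theorem update_of_subset {α : Type} [BEq α] [LawfulBEq α] (s : PySem.Set α) (xs : List α)
    (h : ∀ x ∈ xs, x ∈ s) : PySem.Set.update s xs = s := by
  induction xs generalizing s with
  | nil => rfl
  | cons x rest ih =>
    rw [PySem.Set.update_cons]
    have : PySem.Set.add s x = s := by
      simp [PySem.Set.add, h x (by simp)]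
    rw [this]
    exact ih _ (fun y hy => h y (by simp [hy]))

theorem main_fold (payloads : List (List (String × List (String × Int)))) :
    ∀ (tasks : List String) (cols : List (String × String))
      (seen : PySem.Set (String × String)) (done : PySem.Set String),
    (∀ t m, ((t, m) ∈ seen) ↔ (t ∈ done ∧ (m ∈ primaryMetrics.getD t [] ∨ m ∈ extrasFold t payloads))) →
    (tasks.foldl (fun (st : List (String × String) × PySem.Set (String × String)) task =>
      (PySem.List.sorted (extrasFold task payloads) (fun m => m) false).foldl
        (fun st metric =>
          if PySem.Set.contains st.2 (task, metric) then st
          else (st.1 ++ [(task, metric)], PySem.Set.add st.2 (task, metric)))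
        ((primaryMetrics.getD task []).foldl
          (fun st metric =>
            if PySem.Set.contains st.2 (task, metric) then st
            else (st.1 ++ [(task, metric)], PySem.Set.add st.2 (task, metric))) st)) (cols, seen)).1
    = (tasks.foldl (fun (st : List (String × String) × PySem.Set String) task =>
      if PySem.Set.contains st.2 task then st
      else
        (st.1 ++ (primaryMetrics.getD task []).map (fun m => (task, m)) ++
          ((PySem.List.sorted (extrasFold task payloads) (fun m => m) false).filter
            (fun m => !((primaryMetrics.getD task []).contains m))).map (fun m => (task, m)),
         PySem.Set.add st.2 task)) (cols, done)).1 := by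
  intro tasks
  induction tasks with
  | nil => intro cols seen done hinv; rfl
  | cons task rest ih =>
    intro cols seen done hinv
    simp only [List.foldl_cons]
    rw [dedup_fold task _ (prim_nodup task)]
    rw [dedup_fold task _ (sortedE_nodup task payloads)]
    by_cases hd : task ∈ done
    · -- stale task: A emits nothing, B skips
      have hcd : PySem.Set.contains done task = true := (PySem.Set.contains_iff _ _).mpr hd
      have hprim : ∀ m ∈ primaryMetrics.getD task [], (task, m) ∈ seen :=
        fun m hm => (hinv task m).mpr ⟨hd, Or.inl hm⟩
      have hext : ∀ m ∈ PySem.List.sorted (extrasFold task payloads) (fun m => m) false, (task, m) ∈ seen :=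
        fun m hm => (hinv task m).mpr ⟨hd, Or.inr ((PySem.List.sorted_perm _ _ _).mem_iff.mp hm)⟩
      have hf1 : (primaryMetrics.getD task []).filter
          (fun m => !(PySem.Set.contains seen (task, m))) = [] := by
        rw [List.filter_eq_nil_iff]
        intro m hm
        simp [hprim m hm]
      have hu1 : PySem.Set.update seen ((primaryMetrics.getD task []).map (fun m => (task, m))) = seen :=
        update_of_subset _ _ (by intro x hx; rw [List.mem_map] at hx; obtain ⟨q, hq, he⟩ := hx; subst he; exact hprim q hq)
      rw [hu1]
      have hf2 : (PySem.List.sorted (extrasFold task payloads) (fun m => m) false).filter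
          (fun m => !(PySem.Set.contains seen (task, m))) = [] := by
        rw [List.filter_eq_nil_iff]
        intro m hm
        simp [hext m hm]
      have hu2 : PySem.Set.update seen ((PySem.List.sorted (extrasFold task payloads) (fun m => m) false).map (fun m => (task, m))) = seen :=
        update_of_subset _ _ (by intro x hx; rw [List.mem_map] at hx; obtain ⟨q, hq, he⟩ := hx; subst he; exact hext q hq)
      rw [hf1, hf2, hu2, hcd]
      simp only [List.map_nil, List.append_nil, if_true]
      exact ih cols seen done hinv
    · -- fresh task: A emits primaries then filtered sorted extras; B emits the same
      have hcd : PySem.Set.contains done task = false := by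
        rw [← Bool.not_eq_true, PySem.Set.contains_iff]
        exact hd
      have hfresh : ∀ m, (task, m) ∉ seen := by
        intro m hm
        exact hd ((hinv task m).mp hm).1
      have hf1 : (primaryMetrics.getD task []).filter
          (fun m => !(PySem.Set.contains seen (task, m))) = primaryMetrics.getD task [] := by
        apply List.filter_eq_self.mpr
        intro m _
        simp [hfresh m]
      have hmem1 : ∀ m, (task, m) ∈ PySem.Set.update seen ((primaryMetrics.getD task []).map (fun m => (task, m))) ↔ m ∈ primaryMetrics.getD task [] := by
        intro m
        rw [PySem.Set.mem_update]
        simp only [List.mem_map]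
        constructor
        · rintro (h | ⟨x, hx, he⟩)
          · exact absurd h (hfresh m)
          · cases he; exact hx
        · intro h; exact Or.inr ⟨m, h, rfl⟩
      have hf2 : (PySem.List.sorted (extrasFold task payloads) (fun m => m) false).filter
          (fun m => !(PySem.Set.contains (PySem.Set.update seen ((primaryMetrics.getD task []).map (fun m => (task, m)))) (task, m)))
          = (PySem.List.sorted (extrasFold task payloads) (fun m => m) false).filter
            (fun m => !((primaryMetrics.getD task []).contains m)) := by
        apply List.filter_congr
        intro m _
        congr 1
        apply Bool.coe_iff_coe.mp
        rw [PySem.Set.contains_iff, hmem1 m]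
        simp
      rw [hf1, hf2, hcd]
      simp only [Bool.false_eq_true, if_false]
      refine ih _ _ _ ?_
      -- re-establish the invariant for seen'' and done.add task
      intro t m
      rw [PySem.Set.mem_update]
      simp only [List.mem_map]
      constructor
      · rintro (h | ⟨x, hx, he⟩)
        · rw [PySem.Set.mem_update] at h
          rcases h with h | h
          · obtain ⟨ht, hx⟩ := (hinv t m).mp h
            exact ⟨by rw [PySem.Set.mem_add]; exact Or.inl ht, hx⟩
          · rw [List.mem_map] at h
            obtain ⟨x, hx, he⟩ := h
            cases he
            exact ⟨by rw [PySem.Set.mem_add]; exact Or.inr rfl, Or.inl hx⟩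
        · cases he
          refine ⟨by rw [PySem.Set.mem_add]; exact Or.inr rfl, Or.inr ?_⟩
          exact (PySem.List.sorted_perm _ _ _).mem_iff.mp hx
      · rintro ⟨ht, hx⟩
        rw [PySem.Set.mem_add] at ht
        rcases ht with ht | rfl
        · exact Or.inl (by rw [PySem.Set.mem_update]; exact Or.inl ((hinv t m).mpr ⟨ht, hx⟩))
        · rcases hx with hx | hx
          · exact Or.inl (by rw [PySem.Set.mem_update]; exact Or.inr (by rw [List.mem_map]; exact ⟨m, hx, rfl⟩))
          · exact Or.inr ⟨m, (PySem.List.sorted_perm _ _ _).mem_iff.mpr hx, rfl⟩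

theorem bIndex_inner (data : List (String × List (String × Int)))
    (h : (data.map Prod.fst).Nodup)
    (d : PySem.Dict String (PySem.Set String)) (t : String) :
    (data.foldl (fun d kv =>
      d.insert kv.1 (PySem.Set.update (d.getD kv.1 PySem.Set.empty) (kv.2.map Prod.fst))) d).getD t PySem.Set.empty
    = PySem.Set.update (d.getD t PySem.Set.empty) (((PySem.Dict.mk data).getD t []).map Prod.fst) := by
  induction data generalizing d with
  | nil => simp [PySem.Dict.getD, PySem.Dict.get?, PySem.Set.update]
  | cons kv rest ih =>
    obtain ⟨k, v⟩ := kv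
    simp only [List.map_cons, List.nodup_cons] at h
    rw [List.foldl_cons, ih h.2]
    by_cases ht : t = k
    · subst ht
      rw [PySem.Dict.getD_insert_self]
      have hnone : (PySem.Dict.mk rest).get? t = none := by
        rw [PySem.Dict.get?_eq_none_iff_not_mem_keys]
        simpa using h.1
      simp only [PySem.Dict.getD_eq_get?_getD]
      rw [hnone]
      simp [PySem.Dict.get?_mk_cons, PySem.Set.update_nil]
    · rw [PySem.Dict.getD_insert_of_ne _ _ _ ht]
      have h2 : (PySem.Dict.mk ((k, v) :: rest)).get? t = (PySem.Dict.mk rest).get? t := by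
        rw [PySem.Dict.get?_mk_cons]
        simp [Ne.symm ht]
      simp [PySem.Dict.getD_eq_get?_getD, h2]

theorem bIndex_getD (payloads : List (List (String × List (String × Int))))
    (hp : ∀ data ∈ payloads, (data.map Prod.fst).Nodup) (t : String) :
    (bIndex payloads).getD t PySem.Set.empty = extrasFold t payloads := by
  unfold bIndex extrasFold
  have main : ∀ (ps : List (List (String × List (String × Int)))),
      (∀ data ∈ ps, (data.map Prod.fst).Nodup) →
      ∀ (d : PySem.Dict String (PySem.Set String)),
      (ps.foldl (fun d data =>
        data.foldl (fun d kv =>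
          d.insert kv.1 (PySem.Set.update (d.getD kv.1 PySem.Set.empty) (kv.2.map Prod.fst))) d) d).getD t PySem.Set.empty
      = ps.foldl (fun extras data =>
          PySem.Set.update extras (((PySem.Dict.mk data).getD t []).map Prod.fst)) (d.getD t PySem.Set.empty) := by
    intro ps hps
    induction ps with
    | nil => intro d; rfl
    | cons data rest ih =>
      intro d
      rw [List.foldl_cons, List.foldl_cons,
        ih (fun x hx => hps x (by simp [hx])), bIndex_inner data (hps data (by simp)) d t]
  rw [main payloads hp PySem.Dict.empty]
  rfl

theorem final (tasks : List String) (payloads : List (List (String × List (String × Int))))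
    (hpre : ∀ data ∈ payloads, (data.map Prod.fst).Nodup) :
    downstream_metric_columns tasks payloads = downstream_metric_columns_alt tasks payloads := by
  have hA : downstream_metric_columns tasks payloads
      = (tasks.foldl (fun (st : List (String × String) × PySem.Set (String × String)) task =>
        (PySem.List.sorted (extrasFold task payloads) (fun m => m) false).foldl
          (fun st metric =>
            if PySem.Set.contains st.2 (task, metric) then st
            else (st.1 ++ [(task, metric)], PySem.Set.add st.2 (task, metric)))
          ((primaryMetrics.getD task []).foldl
            (fun st metric =>
              if PySem.Set.contains st.2 (task, metric) then st
              else (st.1 ++ [(task, metric)], PySem.Set.add st.2 (task, metric))) st))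
        ([], PySem.Set.empty)).1 := rfl
  have hB : downstream_metric_columns_alt tasks payloads
      = (tasks.foldl (fun (st : List (String × String) × PySem.Set String) task =>
        if PySem.Set.contains st.2 task then st
        else
          (st.1 ++ (primaryMetrics.getD task []).map (fun m => (task, m)) ++
            ((PySem.List.sorted ((bIndex payloads).getD task PySem.Set.empty) (fun m => m) false).filter
              (fun m => !((primaryMetrics.getD task []).contains m))).map (fun m => (task, m)),
           PySem.Set.add st.2 task))
        ([], PySem.Set.empty)).1 := rfl
  rw [hA, hB]
  have hfun : (fun (st : List (String × String) × PySem.Set String) task =>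
        if PySem.Set.contains st.2 task then st
        else
          (st.1 ++ (primaryMetrics.getD task []).map (fun m => (task, m)) ++
            ((PySem.List.sorted ((bIndex payloads).getD task PySem.Set.empty) (fun m => m) false).filter
              (fun m => !((primaryMetrics.getD task []).contains m))).map (fun m => (task, m)),
           PySem.Set.add st.2 task))
      = (fun (st : List (String × String) × PySem.Set String) task =>
        if PySem.Set.contains st.2 task then st
        else
          (st.1 ++ (primaryMetrics.getD task []).map (fun m => (task, m)) ++
            ((PySem.List.sorted (extrasFold task payloads) (fun m => m) false).filter
              (fun m => !((primaryMetrics.getD task []).contains m))).map (fun m => (task, m)),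
           PySem.Set.add st.2 task)) := by
    funext st task
    rw [bIndex_getD payloads hpre task]
  rw [hfun]
  apply main_fold payloads tasks [] PySem.Set.empty PySem.Set.empty
  intro t m
  simp [PySem.Set.empty]

-- ===== VERDICT (by name: the statement is the Claim_ definition above) =====
theorem downstream_metric_columns_spec : Claim_equal_downstream_metric_columns := by
  intro tasks payloads _ hpre
  exact final tasks payloads hpre
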